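-- pv_equiv track=rewrite | github.com/hjn5018/algorithms-solved | 공_던지기.py | solution
-- ===== SOURCE A (Python) =====
-- def solution(numbers, k):
--     ball_pass_list = []
--     for j in range(len(numbers)):
--         if (1 + 2*j) > len(numbers):
--             ball_pass_list.append((1 + 2*j)%len(numbers))
--         else:
--             ball_pass_list.append(1 + 2*j)
--
--     i = 0
--     if len(numbers) % 2:
--         i = k % len(numbers)
--     else:
--         i = k % (len(numbers) // 2)
--     return ball_pass_list[i-1]
-- ===== SOURCE B (Python) =====
-- def solution(numbers, k):
--     n = len(numbers)
--     i = k % n if n % 2 else k % (n // 2)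
--     j = (i - 1) % n
--     v = 1 + 2 * j
--     return v % n if v > n else v
-- ===== Notes on version B (the rewrite author's own statement) =====
-- stated objective: faster
-- what changed: B drops A's O(n) list-building loop and computes the single needed element in closed form: the index (i-1) mod n and the value 1+2j (reduced mod n when it exceeds n).
import Mathlib
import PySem

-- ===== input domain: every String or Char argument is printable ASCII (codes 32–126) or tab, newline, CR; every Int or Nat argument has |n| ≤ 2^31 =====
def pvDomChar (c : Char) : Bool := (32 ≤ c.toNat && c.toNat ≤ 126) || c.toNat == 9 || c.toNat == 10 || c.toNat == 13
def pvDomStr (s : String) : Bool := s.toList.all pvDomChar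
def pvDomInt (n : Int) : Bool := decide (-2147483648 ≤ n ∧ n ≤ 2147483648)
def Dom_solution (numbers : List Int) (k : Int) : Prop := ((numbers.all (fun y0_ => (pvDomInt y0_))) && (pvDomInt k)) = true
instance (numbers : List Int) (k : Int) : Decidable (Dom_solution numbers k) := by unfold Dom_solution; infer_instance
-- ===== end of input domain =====

-- B replaces A's O(n) list-building loop with an O(1) closed-form computation of the one needed element.

-- ===== PORT A =====
def solution (numbers : List Int) (k : Int) : Int :=
  let n : Int := numbers.length
  let ball :=
    (PySem.List.pyRange 0 n 1).foldl
      (fun acc j =>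
        if 1 + 2*j > n then acc ++ [PySem.Int.mod (1 + 2*j) n]
        else acc ++ [1 + 2*j]) []
  let i : Int := if PySem.Int.mod n 2 ≠ 0 then PySem.Int.mod k n
                 else PySem.Int.mod k (PySem.Int.floordiv n 2)
  (PySem.List.pyGet? ball (i - 1)).getD 0   -- Pre_ excludes [], where Python raises ZeroDivisionError before indexing

-- ===== PORT B =====
def solution_alt (numbers : List Int) (k : Int) : Int :=
  let n : Int := numbers.length
  let i : Int := if PySem.Int.mod n 2 ≠ 0 then PySem.Int.mod k n
                 else PySem.Int.mod k (PySem.Int.floordiv n 2)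
  let j : Int := PySem.Int.mod (i - 1) n
  let v : Int := 1 + 2*j
  if v > n then PySem.Int.mod v n else v

-- ===== PRECONDITION & SPEC =====
-- Pre_ excludes the empty list, on which Python A raises ZeroDivisionError (k % 0 or k % (0//2)).
def Pre_solution (numbers : List Int) (k : Int) : Prop := numbers ≠ []
instance (numbers : List Int) (k : Int) : Decidable (Pre_solution numbers k) := by unfold Pre_solution; infer_instance
def pvWitness_solution : List Int × Int := ([1, 2, 3, 4, 5], 3)

def Spec_solution (numbers : List Int) (k : Int) (out : Int) : Prop := out = solution_alt numbers k
instance (numbers : List Int) (k : Int) (out : Int) : Decidable (Spec_solution numbers k out) := by unfold Spec_solution; infer_instance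

-- ===== CLAIM (what is proved, stated in full; the proofs are below) =====
def Claim_equal_solution : Prop := ∀ (numbers : List Int) (k : Int), Dom_solution numbers k → Pre_solution numbers k → Spec_solution numbers k (solution numbers k)

-- ===== LEMMAS AND PROOFS =====

theorem foldl_append_singleton {α β : Type} (g : α → β) (xs : List α) (init : List β) :
    xs.foldl (fun acc j => acc ++ [g j]) init = init ++ xs.map g := by
  induction xs generalizing init with
  | nil => simp
  | cons x xs ih => simp [List.foldl, ih]

theorem solution_spec_aux (numbers : List Int) (k : Int) (h : numbers ≠ []) :
    solution numbers k = solution_alt numbers k := by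
  have hnlen : 0 < numbers.length := List.length_pos_iff.mpr h
  have hn : 0 < ((numbers.length : Int)) := by exact_mod_cast hnlen
  show (PySem.List.pyGet?
      ((PySem.List.pyRange 0 (numbers.length : Int) 1).foldl
        (fun acc j => if 1 + 2*j > (numbers.length : Int)
          then acc ++ [PySem.Int.mod (1 + 2*j) (numbers.length : Int)]
          else acc ++ [1 + 2*j]) [])
      ((if PySem.Int.mod (numbers.length : Int) 2 ≠ 0 then PySem.Int.mod k (numbers.length : Int)
        else PySem.Int.mod k (PySem.Int.floordiv (numbers.length : Int) 2)) - 1)).getD 0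
    = (if 1 + 2*(PySem.Int.mod ((if PySem.Int.mod (numbers.length : Int) 2 ≠ 0 then PySem.Int.mod k (numbers.length : Int)
          else PySem.Int.mod k (PySem.Int.floordiv (numbers.length : Int) 2)) - 1) (numbers.length : Int)) > (numbers.length : Int)
        then PySem.Int.mod (1 + 2*(PySem.Int.mod ((if PySem.Int.mod (numbers.length : Int) 2 ≠ 0 then PySem.Int.mod k (numbers.length : Int)
          else PySem.Int.mod k (PySem.Int.floordiv (numbers.length : Int) 2)) - 1) (numbers.length : Int))) (numbers.length : Int)
        else 1 + 2*(PySem.Int.mod ((if PySem.Int.mod (numbers.length : Int) 2 ≠ 0 then PySem.Int.mod k (numbers.length : Int)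
          else PySem.Int.mod k (PySem.Int.floordiv (numbers.length : Int) 2)) - 1) (numbers.length : Int)))
  obtain ⟨i, hi⟩ : ∃ i : Int, (if PySem.Int.mod (numbers.length : Int) 2 ≠ 0 then PySem.Int.mod k (numbers.length : Int)
        else PySem.Int.mod k (PySem.Int.floordiv (numbers.length : Int) 2)) = i := ⟨_, rfl⟩
  rw [hi]
  have hib : 0 ≤ i ∧ i < (numbers.length : Int) := by
    rw [← hi]
    by_cases hpar : PySem.Int.mod (numbers.length : Int) 2 ≠ 0
    · rw [if_pos hpar, PySem.Int.mod_eq_emod_of_pos hn]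
      exact ⟨Int.emod_nonneg k (by omega), Int.emod_lt_of_pos k hn⟩
    · rw [if_neg hpar]
      have heven : (numbers.length : Int) % 2 = 0 := by
        have := PySem.Int.mod_eq_emod_of_pos (a := (numbers.length : Int)) (b := 2) (by norm_num)
        omega
      have hd : PySem.Int.floordiv (numbers.length : Int) 2 = (numbers.length : Int) / 2 :=
        PySem.Int.floordiv_eq_ediv_of_pos (by norm_num)
      have hd2 : 0 < (numbers.length : Int) / 2 := by omega
      rw [hd, PySem.Int.mod_eq_emod_of_pos hd2]
      have h1 := Int.emod_nonneg k (by omega : (numbers.length : Int) / 2 ≠ 0)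
      have h2 := Int.emod_lt_of_pos k hd2
      exact ⟨h1, by omega⟩
  obtain ⟨hi0, hi1⟩ := hib
  have hfold : (PySem.List.pyRange 0 (numbers.length : Int) 1).foldl
      (fun acc j => if 1 + 2*j > (numbers.length : Int)
        then acc ++ [PySem.Int.mod (1 + 2*j) (numbers.length : Int)]
        else acc ++ [1 + 2*j]) ([] : List Int)
      = (PySem.List.pyRange 0 (numbers.length : Int) 1).map
          (fun j => if 1 + 2*j > (numbers.length : Int)
            then PySem.Int.mod (1 + 2*j) (numbers.length : Int) else 1 + 2*j) := by
    have hf : (fun (acc : List Int) (j : Int) =>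
        if 1 + 2*j > (numbers.length : Int)
          then acc ++ [PySem.Int.mod (1 + 2*j) (numbers.length : Int)]
          else acc ++ [1 + 2*j])
        = (fun acc j => acc ++ [if 1 + 2*j > (numbers.length : Int)
            then PySem.Int.mod (1 + 2*j) (numbers.length : Int) else 1 + 2*j]) := by
      funext acc j
      by_cases hc : 1 + 2*j > (numbers.length : Int) <;> simp [hc]
    rw [hf, foldl_append_singleton, List.nil_append]
  have hj : PySem.Int.mod (i - 1) (numbers.length : Int) = if i = 0 then (numbers.length : Int) - 1 else i - 1 := by
    rw [PySem.Int.mod_eq_emod_of_pos hn]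
    by_cases h0 : i = 0
    · rw [if_pos h0, h0]
      have h1 : ((numbers.length : Int) - 1 - (numbers.length : Int)) % (numbers.length : Int)
          = ((numbers.length : Int) - 1) % (numbers.length : Int) := Int.sub_emod_right _ _
      have h2 : ((numbers.length : Int) - 1) % (numbers.length : Int) = (numbers.length : Int) - 1 :=
        Int.emod_eq_of_lt (by omega) (by omega)
      have h3 : (0:Int) - 1 = (numbers.length : Int) - 1 - (numbers.length : Int) := by omega
      rw [h3, h1, h2]
    · rw [if_neg h0]
      exact Int.emod_eq_of_lt (by omega) (by omega)
  rw [hfold, hj]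
  by_cases h0 : i = 0
  · rw [if_pos h0, h0]
    rw [show (0:Int) - 1 = -1 by omega, PySem.List.pyGet?_neg_one]
    rw [List.getLast?_eq_getElem?]
    have hlen : ((PySem.List.pyRange 0 (numbers.length : Int) 1).map
        (fun j => if 1 + 2*j > (numbers.length : Int)
          then PySem.Int.mod (1 + 2*j) (numbers.length : Int) else 1 + 2*j)).length = numbers.length := by
      simp [PySem.List.length_pyRange_one]
    rw [hlen]
    rw [PySem.List.getElem?_map_pyRange_zero _ numbers.length (numbers.length - 1) (by omega)]
    have hcast : ((numbers.length - 1 : Nat) : Int) = (numbers.length : Int) - 1 := by omega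
    rw [hcast, Option.getD_some]
  · rw [if_neg h0]
    rw [show i - 1 = (((i-1).toNat : Nat) : Int) by omega]
    rw [PySem.List.pyGet?_natCast]
    rw [PySem.List.getElem?_map_pyRange_zero _ numbers.length ((i-1).toNat) (by omega)]
    rw [Option.getD_some]

-- ===== VERDICT (by name: the statement is the Claim_ definition above) =====
theorem solution_spec : Claim_equal_solution := by
  intro numbers k _ hpre
  exact solution_spec_aux numbers k hpre
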